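-- pv_equiv track=rewrite | github.com/zhiyanfoo/computational_plays | crunch-shake/analysis.py | get_female_lines_by_scene
-- ===== SOURCE A (Python) =====
-- def get_female_lines_by_scene(female_to_female, act_scene_start_end):
--     """ for each scene in play, get the range of lines in female_to_female
--     which belong to that scene
--     """
--     i = 0
--     female_lines_by_scene = []
--     for _ , end in act_scene_start_end:
--         for j in range(i, len(female_to_female)):
--             if female_to_female[j] >= end:
--                 female_lines_by_scene.append((i, j))
--                 i = j
--                 break
--     female_lines_by_scene.append((i, len(female_to_female)))
--     return female_lines_by_scene
-- ===== SOURCE B (Python) =====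
-- def get_female_lines_by_scene(female_to_female, act_scene_start_end):
--     """Same result as A, computed via a max segment tree: each per-scene
--     query 'first index j >= i with f[j] >= end' is answered by a recursive
--     tree descent pruned by subtree maxima."""
--     f = female_to_female
--     n = len(f)
--
--     def build(seg):  # never called on an empty list
--         if len(seg) == 1:
--             return ('leaf', seg[0])
--         k = len(seg) // 2
--         l = build(seg[:k])
--         r = build(seg[k:])
--         return ('node', k, max(maxv(l), maxv(r)), l, r)
--
--     def maxv(t):
--         return t[1] if t[0] == 'leaf' else t[2]
--
--     def query(t, i, e):
--         # first index j >= i (relative to this subtree) with value >= e, else None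
--         if t[0] == 'leaf':
--             return 0 if i <= 0 and t[1] >= e else None
--         _, k, mx, l, r = t
--         if mx < e:
--             return None
--         j = query(l, i, e) if i < k else None
--         if j is not None:
--             return j
--         rj = query(r, i - k, e)
--         return None if rj is None else k + rj
--
--     tree = build(f) if n else None
--     i = 0
--     out = []
--     for _, end in act_scene_start_end:
--         j = query(tree, i, end) if tree is not None else None
--         if j is not None:
--             out.append((i, j))
--             i = j
--     out.append((i, n))
--     return out
-- ===== Notes on version B (the rewrite author's own statement) =====
-- stated objective: alternative
-- what changed: B builds a max segment tree over the list once and answers each scene's query 'first index >= i with value >= end' by a recursive tree descent pruned by subtree maxima, replacing A's per-scene forward rescan; it trades A's low constant factor for a different data structure and traversal.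
import Mathlib
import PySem

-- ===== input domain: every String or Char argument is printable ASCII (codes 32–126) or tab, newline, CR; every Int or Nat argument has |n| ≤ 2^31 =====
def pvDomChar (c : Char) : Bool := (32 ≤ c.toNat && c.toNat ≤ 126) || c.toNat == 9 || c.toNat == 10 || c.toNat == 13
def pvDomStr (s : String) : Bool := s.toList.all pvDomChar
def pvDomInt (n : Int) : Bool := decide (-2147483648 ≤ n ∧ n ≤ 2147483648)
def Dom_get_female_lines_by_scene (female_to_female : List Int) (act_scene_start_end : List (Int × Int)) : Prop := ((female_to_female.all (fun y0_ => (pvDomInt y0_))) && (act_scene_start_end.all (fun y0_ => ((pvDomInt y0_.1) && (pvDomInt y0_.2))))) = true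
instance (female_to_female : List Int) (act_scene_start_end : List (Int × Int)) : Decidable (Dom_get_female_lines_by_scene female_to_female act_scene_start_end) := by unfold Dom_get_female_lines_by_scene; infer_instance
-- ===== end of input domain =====

-- B answers each scene's "first index ≥ i with value ≥ end" by a recursive descent of a
-- max segment tree built once, pruned by subtree maxima — a different data structure and
-- traversal than A's per-scene forward rescan (alternative; not claimed faster).

-- ===== PORT A =====
-- inner `for j in range(i, len(female_to_female))` loop with break: first j ≥ i with f[j] ≥ endv, none if no break
def pvFindA (f : List Int) (endv : Int) (j : Nat) : Option Nat :=
  if h : j < f.length then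
    (if f[j] ≥ endv then some j else pvFindA f endv (j+1))
  else none
termination_by f.length - j

def get_female_lines_by_scene (female_to_female : List Int) (act_scene_start_end : List (Int × Int)) : List (Int × Int) :=
  let st := act_scene_start_end.foldl
    (fun (st : Nat × List (Int × Int)) se =>
      match pvFindA female_to_female se.2 st.1 with
      | some j => (j, st.2 ++ [((st.1 : Int), (j : Int))])
      | none => st) (0, [])
  st.2 ++ [((st.1 : Int), (female_to_female.length : Int))]

-- ===== PORT B =====
-- the segment tree: a leaf holds one value; a node holds (left size, subtree max, left, right)
inductive PvTree : Type
  | leaf : Int → PvTree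
  | node : Nat → Int → PvTree → PvTree → PvTree

def pvMaxv : PvTree → Int
  | .leaf v => v
  | .node _ mx _ _ => mx

-- Python's `build(seg)`; Python never calls it on an empty list (the `[]` branch here is dead)
def pvBuild (s : List Int) : PvTree :=
  if h : s.length ≤ 1 then .leaf (s.headD 0)
  else
    let k := s.length / 2
    let l := pvBuild (s.take k)
    let r := pvBuild (s.drop k)
    .node k (max (pvMaxv l) (pvMaxv r)) l r
termination_by s.length
decreasing_by
  · simp only [List.length_take]; omega
  · simp only [List.length_drop]; omega

-- Python's `query(t, i, e)`: its `i <= 0` test on a possibly negative Python int is the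
-- `i = 0` test here, because Lean's Nat subtraction `i - k` truncates exactly where the
-- Python int goes negative
def pvQuery : PvTree → Nat → Int → Option Nat
  | .leaf v, i, e => if i = 0 ∧ v ≥ e then some 0 else none
  | .node k mx l r, i, e =>
    if mx < e then none
    else
      match (if i < k then pvQuery l i e else none) with
      | some j => some j
      | none => (pvQuery r (i - k) e).map (fun rj => k + rj)

def get_female_lines_by_scene_alt (female_to_female : List Int) (act_scene_start_end : List (Int × Int)) : List (Int × Int) :=
  let tree : Option PvTree := if female_to_female.isEmpty then none else some (pvBuild female_to_female)
  let st := act_scene_start_end.foldl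
    (fun (st : Nat × List (Int × Int)) se =>
      match (match tree with
             | some t => pvQuery t st.1 se.2
             | none => none) with
      | some j => (j, st.2 ++ [((st.1 : Int), (j : Int))])
      | none => st) (0, [])
  st.2 ++ [((st.1 : Int), (female_to_female.length : Int))]

-- ===== PRECONDITION & SPEC =====
def Spec_get_female_lines_by_scene (female_to_female : List Int) (act_scene_start_end : List (Int × Int)) (out : List (Int × Int)) : Prop := out = get_female_lines_by_scene_alt female_to_female act_scene_start_end
instance (female_to_female : List Int) (act_scene_start_end : List (Int × Int)) (out : List (Int × Int)) : Decidable (Spec_get_female_lines_by_scene female_to_female act_scene_start_end out) := by unfold Spec_get_female_lines_by_scene; infer_instance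

-- ===== CLAIM (what is proved, stated in full; the proofs are below) =====
def Claim_equal_get_female_lines_by_scene : Prop := ∀ (female_to_female : List Int) (act_scene_start_end : List (Int × Int)), Dom_get_female_lines_by_scene female_to_female act_scene_start_end → Spec_get_female_lines_by_scene female_to_female act_scene_start_end (get_female_lines_by_scene female_to_female act_scene_start_end)

-- ===== LEMMAS AND PROOFS =====

-- reference function: first index j ≥ i with s[j] ≥ e, as findIdx? over the dropped prefix
def pvF (s : List Int) (i : Nat) (e : Int) : Option Nat :=
  ((s.drop i).findIdx? (fun v => e ≤ v)).map (fun j => i + j)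

theorem pvFindA_eq_pvF (f : List Int) (e : Int) : ∀ i, pvFindA f e i = pvF f i e := by
  have H : ∀ (fuel i : Nat), f.length - i ≤ fuel → pvFindA f e i = pvF f i e := by
    intro fuel
    induction fuel with
    | zero =>
      intro i hk
      have hd : f.drop i = [] := List.drop_eq_nil_of_le (by omega)
      rw [pvFindA]
      simp [show ¬ i < f.length by omega, pvF, hd]
    | succ k ih =>
      intro i hk
      by_cases h : i < f.length
      · have hdrop : f.drop i = f[i] :: f.drop (i+1) := List.drop_eq_getElem_cons h
        by_cases he : e ≤ f[i]
        · rw [pvFindA, dif_pos h, if_pos he, pvF, hdrop, List.findIdx?_cons]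
          simp [he]
        · rw [pvFindA, dif_pos h, if_neg he, pvF, hdrop, List.findIdx?_cons]
          simp only [decide_eq_true_eq, if_neg he]
          rw [ih (i+1) (by omega), pvF]
          cases hfi : (f.drop (i+1)).findIdx? (fun v => e ≤ v) with
          | none => simp
          | some j => simp; omega
      · have hd : f.drop i = [] := List.drop_eq_nil_of_le (by omega)
        rw [pvFindA]
        simp [h, pvF, hd]
  intro i; exact H f.length i (by omega)

theorem pvF_none_of_ge (s : List Int) (i : Nat) (e : Int) (h : s.length ≤ i) :
    pvF s i e = none := by
  simp [pvF, List.drop_eq_nil_of_le h]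

theorem pvF_none_of_lt (s : List Int) (i : Nat) (e : Int)
    (hall : ∀ v ∈ s, v < e) : pvF s i e = none := by
  have : (s.drop i).findIdx? (fun v => e ≤ v) = none := by
    rw [List.findIdx?_eq_none_iff]
    intro v hv
    have := hall v (List.mem_of_mem_drop hv)
    simpa using by omega
  simp [pvF, this]

theorem pvF_append (a b : List Int) (i : Nat) (e : Int) :
    pvF (a ++ b) i e =
      match pvF a i e with
      | some j => some j
      | none => (pvF b (i - a.length) e).map (fun j => a.length + j) := by
  rw [pvF, List.drop_append, List.findIdx?_append]
  by_cases h : i ≤ a.length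
  · cases hfa : (a.drop i).findIdx? (fun v => e ≤ v) with
    | some j => simp [pvF, hfa]
    | none =>
      have hib : i - a.length = 0 := by omega
      have hlen : (a.drop i).length = a.length - i := by simp
      cases hfb : b.findIdx? (fun v => e ≤ v) with
      | none => simp [pvF, hfa, hfb, hib]
      | some j =>
        simp [pvF, hfa, hfb, hib, hlen]
        omega
  · have hda : a.drop i = [] := List.drop_eq_nil_of_le (by omega)
    have hfa : pvF a i e = none := pvF_none_of_ge a i e (by omega)
    rw [hda, hfa]
    cases hfb : (b.drop (i - a.length)).findIdx? (fun v => e ≤ v) with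
    | none => simp [pvF, hfb]
    | some j =>
      simp [pvF, hfb]
      omega

theorem pvBuild_node (s : List Int) (h1 : ¬ s.length ≤ 1) :
    pvBuild s = .node (s.length / 2)
      (max (pvMaxv (pvBuild (s.take (s.length / 2)))) (pvMaxv (pvBuild (s.drop (s.length / 2)))))
      (pvBuild (s.take (s.length / 2))) (pvBuild (s.drop (s.length / 2))) := by
  rw [pvBuild]
  simp only [dif_neg h1]

theorem pvMaxv_build_fuel (n : Nat) : ∀ (s : List Int), s.length ≤ n → s ≠ [] →
    ∀ v ∈ s, v ≤ pvMaxv (pvBuild s) := by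
  induction n with
  | zero =>
    intro s hn hne
    cases s with
    | nil => exact absurd rfl hne
    | cons a t => simp at hn
  | succ n ih =>
    intro s hn hne v hv
    by_cases h1 : s.length ≤ 1
    · have hone : s.length = 1 := by
        cases s with
        | nil => exact absurd rfl hne
        | cons a t => simp at h1 ⊢; omega
      match s, hone with
      | [a], _ =>
        simp at hv
        rw [pvBuild]
        simp [hv, pvMaxv]
    · rw [pvBuild_node s h1]
      set k := s.length / 2 with hk
      have hkb : 1 ≤ k ∧ k < s.length := by constructor <;> omega
      have htl : (s.take k).length = k := by simp; omega
      have hdl : (s.drop k).length = s.length - k := by simp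
      have htne : s.take k ≠ [] := by
        intro hnil; have := congrArg List.length hnil; rw [htl] at this; simp at this; omega
      have hdne : s.drop k ≠ [] := by
        intro hnil; have := congrArg List.length hnil; rw [hdl] at this; simp at this; omega
      rw [← List.take_append_drop k s] at hv
      rcases List.mem_append.mp hv with hl | hr
      · have := ih (s.take k) (by rw [htl]; omega) htne v hl
        simp only [pvMaxv]
        exact le_trans this (le_max_left _ _)
      · have := ih (s.drop k) (by rw [hdl]; omega) hdne v hr
        simp only [pvMaxv]
        exact le_trans this (le_max_right _ _)

theorem pvMaxv_build (s : List Int) (hs : s ≠ []) : ∀ v ∈ s, v ≤ pvMaxv (pvBuild s) :=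
  pvMaxv_build_fuel s.length s (by omega) hs

theorem pvQuery_build_fuel (n : Nat) : ∀ (s : List Int), s.length ≤ n → s ≠ [] →
    ∀ i e, pvQuery (pvBuild s) i e = pvF s i e := by
  induction n with
  | zero =>
    intro s hn hne
    cases s with
    | nil => exact absurd rfl hne
    | cons a t => simp at hn
  | succ n ih =>
    intro s hn hne i e
    by_cases h1 : s.length ≤ 1
    · have hone : s.length = 1 := by
        cases s with
        | nil => exact absurd rfl hne
        | cons a t => simp at h1 ⊢; omega
      match s, hone with
      | [a], _ =>
        have hb : pvBuild [a] = .leaf a := by rw [pvBuild]; rfl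
        rw [hb, pvQuery]
        by_cases hi : i = 0
        · subst hi
          by_cases he : a ≥ e
          · simp [he, pvF, List.findIdx?_cons]
          · simp [he, pvF, List.findIdx?_cons]
        · simp [hi, pvF, List.drop_eq_nil_of_le (show List.length [a] ≤ i by simp; omega)]
    · rw [pvBuild_node s h1]
      set k := s.length / 2 with hk
      have hkb : 1 ≤ k ∧ k < s.length := by constructor <;> omega
      have htl : (s.take k).length = k := by simp; omega
      have hdl : (s.drop k).length = s.length - k := by simp
      have htne : s.take k ≠ [] := by
        intro hnil; have := congrArg List.length hnil; rw [htl] at this; simp at this; omega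
      have hdne : s.drop k ≠ [] := by
        intro hnil; have := congrArg List.length hnil; rw [hdl] at this; simp at this; omega
      have ihl := ih (s.take k) (by rw [htl]; omega) htne
      have ihr := ih (s.drop k) (by rw [hdl]; omega) hdne
      rw [pvQuery]
      by_cases hmx : (max (pvMaxv (pvBuild (s.take k))) (pvMaxv (pvBuild (s.drop k)))) < e
      · rw [if_pos hmx]
        have hall : ∀ v ∈ s, v < e := by
          intro v hv
          rw [← List.take_append_drop k s] at hv
          rcases List.mem_append.mp hv with hl | hr
          · have := pvMaxv_build (s.take k) htne v hl; omega
          · have := pvMaxv_build (s.drop k) hdne v hr; omega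
        exact (pvF_none_of_lt s i e hall).symm
      · rw [if_neg hmx]
        have hleft : (if i < k then pvQuery (pvBuild (s.take k)) i e else none) = pvF (s.take k) i e := by
          by_cases hik : i < k
          · rw [if_pos hik, ihl i e]
          · rw [if_neg hik]
            exact (pvF_none_of_ge (s.take k) i e (by rw [htl]; omega)).symm
        rw [hleft, ihr (i - k) e]
        conv_rhs => rw [← List.take_append_drop k s, pvF_append, htl]

-- ===== VERDICT (by name: the statement is the Claim_ definition above) =====
theorem get_female_lines_by_scene_spec : Claim_equal_get_female_lines_by_scene := by
  intro f scenes _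
  unfold Spec_get_female_lines_by_scene
  simp only [get_female_lines_by_scene, get_female_lines_by_scene_alt]
  have hfun : (fun (st : Nat × List (Int × Int)) (se : Int × Int) =>
        match pvFindA f se.2 st.1 with
        | some j => (j, st.2 ++ [((st.1 : Int), (j : Int))])
        | none => st)
      = (fun (st : Nat × List (Int × Int)) (se : Int × Int) =>
        match (match (if f.isEmpty then (none : Option PvTree) else some (pvBuild f)) with
               | some t => pvQuery t st.1 se.2
               | none => none) with
        | some j => (j, st.2 ++ [((st.1 : Int), (j : Int))])
        | none => st) := by
    funext st se
    by_cases hf : f = []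
    · subst hf
      rw [pvFindA_eq_pvF]
      simp [pvF]
    · have h0 : f.isEmpty = false := by simp [hf]
      simp only [h0, Bool.false_eq_true, if_false]
      rw [pvQuery_build_fuel f.length f (by omega) hf, pvFindA_eq_pvF]
  rw [hfun]
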